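-- pv_equiv track=rewrite | github.com/Osman-Bora-Yilmazmis/Analysis-of-Entered-Data | Girilen Texteki verilerin analizi.py | o_uzunluktaki_kelime_say
-- ===== SOURCE A (Python) =====
-- def o_uzunluktaki_kelime_say(tertemiz_cikti): #KELIMELERIN UZUNLUGUNUN HESAPLANDIGI YERDIR(2. TABLONUN ISTATISTIKLERININ HESAPLANDIGI YER)
--     butun_kelimelerin_uzunlugu={}
--     her_bir_kelime=tertemiz_cikti.split()#HER BIR KELIMEYI TEK TEK AYIRIR
--     for kelime in her_bir_kelime:
--         kelimenin_uzunlugu=len(kelime)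
--         if kelimenin_uzunlugu in butun_kelimelerin_uzunlugu:
--             butun_kelimelerin_uzunlugu[kelimenin_uzunlugu] += 1
--         else:
--             butun_kelimelerin_uzunlugu[kelimenin_uzunlugu] = 1
--
--     return butun_kelimelerin_uzunlugu
-- ===== SOURCE B (Python) =====
-- def o_uzunluktaki_kelime_say(tertemiz_cikti):
--     # Recursive partitioning: take the first remaining length, count it by how much
--     # filtering it out shrinks the list, recurse on the residue; no incremental tally.
--     def grupla(uzunluklar):
--         if not uzunluklar:
--             return []
--         u = uzunluklar[0]
--         kalan = [x for x in uzunluklar if x != u]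
--         return [(u, len(uzunluklar) - len(kalan))] + grupla(kalan)
--     return dict(grupla([len(kelime) for kelime in tertemiz_cikti.split()]))
-- ===== Notes on version B (the rewrite author's own statement) =====
-- stated objective: alternative
-- what changed: Replaces the single-pass membership-test-and-increment dict tally with a recursive partition: repeatedly take the first remaining word length, obtain its count as the shrink of a filter removing it, and recurse on the residue, building the dict once from the resulting pairs.
import Mathlib
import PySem

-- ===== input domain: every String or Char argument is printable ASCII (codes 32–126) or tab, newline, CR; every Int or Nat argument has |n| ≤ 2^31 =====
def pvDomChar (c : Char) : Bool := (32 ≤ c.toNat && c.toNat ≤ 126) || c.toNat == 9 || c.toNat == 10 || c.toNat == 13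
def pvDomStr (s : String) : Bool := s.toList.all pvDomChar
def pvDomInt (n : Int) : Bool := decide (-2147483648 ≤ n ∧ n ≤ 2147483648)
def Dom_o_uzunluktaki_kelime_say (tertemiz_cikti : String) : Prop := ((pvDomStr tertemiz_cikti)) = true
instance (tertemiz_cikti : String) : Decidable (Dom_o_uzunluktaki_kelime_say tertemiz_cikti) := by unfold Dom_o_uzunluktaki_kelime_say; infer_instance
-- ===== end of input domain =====

-- B replaces A's incremental dict tally with a recursive partition (count = shrink under a filter, recurse on the residue); alternative decomposition, no speed claim.
-- ===== PORT A =====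
-- for each word: if its length is a key, increment, else insert 1; return the dict
def o_uzunluktaki_kelime_say (tertemiz_cikti : String) : List (Int × Int) :=
  let her_bir_kelime := PySem.Str.split₀ tertemiz_cikti
  (her_bir_kelime.foldl (fun butun kelime =>
      let kelimenin_uzunlugu : Int := PySem.Str.len kelime
      if butun.contains kelimenin_uzunlugu then
        butun.modify kelimenin_uzunlugu 0 (· + 1)
      else
        butun.insert kelimenin_uzunlugu 1) PySem.Dict.empty).items

-- ===== PORT B =====
-- take the first remaining length, count it as the shrink of filtering it out, recurse on the residue
def grupla : List Int → List (Int × Int)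
  | [] => []
  | u :: t =>
    let kalan := (u :: t).filter (fun x => x != u)
    (u, ((u :: t).length : Int) - (kalan.length : Int)) :: grupla kalan
termination_by l => l.length
decreasing_by
  simp only [List.filter_cons, bne_self_eq_false, Bool.false_eq_true, if_false, List.length_cons]
  exact Nat.lt_succ_of_le (List.length_filter_le _ t)

def o_uzunluktaki_kelime_say_alt (tertemiz_cikti : String) : List (Int × Int) :=
  (PySem.Dict.ofList (grupla ((PySem.Str.split₀ tertemiz_cikti).map (fun kelime => PySem.Str.len kelime)))).items

-- ===== PRECONDITION & SPEC =====
def Spec_o_uzunluktaki_kelime_say (tertemiz_cikti : String) (out : List (Int × Int)) : Prop := out = o_uzunluktaki_kelime_say_alt tertemiz_cikti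
instance (tertemiz_cikti : String) (out : List (Int × Int)) : Decidable (Spec_o_uzunluktaki_kelime_say tertemiz_cikti out) := by unfold Spec_o_uzunluktaki_kelime_say; infer_instance

-- ===== CLAIM =====
def Claim_equal_o_uzunluktaki_kelime_say : Prop := ∀ (tertemiz_cikti : String), Dom_o_uzunluktaki_kelime_say tertemiz_cikti → Spec_o_uzunluktaki_kelime_say tertemiz_cikti (o_uzunluktaki_kelime_say tertemiz_cikti)

-- ===== LEMMAS AND PROOFS =====

lemma discard_comm (s : List Int) (a b : Int) :
    PySem.Set.discard (PySem.Set.discard s a) b = PySem.Set.discard (PySem.Set.discard s b) a := by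
  simp only [PySem.Set.discard, List.filter_filter]
  exact List.filter_congr (fun x _ => by rw [Bool.and_comm])

lemma discard_idem (s : List Int) (a : Int) :
    PySem.Set.discard (PySem.Set.discard s a) a = PySem.Set.discard s a := by
  simp only [PySem.Set.discard, List.filter_filter]
  exact List.filter_congr (fun x _ => by rw [Bool.and_self])

lemma discard_cons_self (s : List Int) (x : Int) :
    PySem.Set.discard (x :: s) x = PySem.Set.discard s x := by
  simp [PySem.Set.discard]

lemma discard_cons_ne (s : List Int) {x a : Int} (h : x ≠ a) :
    PySem.Set.discard (x :: s) a = x :: PySem.Set.discard s a := by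
  simp [PySem.Set.discard, h]

lemma ofList_filter_ne (u : Int) (l : List Int) :
    PySem.Set.ofList (l.filter (fun x => x != u)) = PySem.Set.discard (PySem.Set.ofList l) u := by
  induction l with
  | nil => rfl
  | cons x t ih =>
    by_cases hx : x = u
    · subst hx
      rw [List.filter_cons_of_neg (by simp), ih, PySem.Set.ofList_cons, discard_cons_self,
        discard_idem]
    · rw [List.filter_cons_of_pos (by simpa using hx), PySem.Set.ofList_cons,
        PySem.Set.ofList_cons, ih, discard_cons_ne _ hx, discard_comm]

lemma grupla_eq (l : List Int) :
    grupla l = (PySem.Set.ofList l).map (fun k => (k, (l.count k : Int))) := by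
  induction l using grupla.induct with
  | case1 => simp [grupla]
  | case2 u t kalan ih =>
    rw [grupla]
    rw [ih, PySem.Set.ofList_cons, List.map_cons]
    have hkalan : kalan = (u :: t).filter (fun x => x != u) := rfl
    have hlen : ((u :: t).filter (fun x => x != u)).length + (u :: t).count u = (u :: t).length := by
      have h := List.length_eq_countP_add_countP (p := fun x => x != u) (l := u :: t)
      have h1 : List.countP (fun a => decide ¬((fun x => x != u) a = true)) (u :: t)
          = (u :: t).count u := by
        apply List.countP_congr
        intro a _
        simp
      rw [List.countP_eq_length_filter, h1] at h
      omega
    congr 1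
    · congr 1
      omega
    · rw [hkalan, ofList_filter_ne, PySem.Set.ofList_cons, discard_cons_self, discard_idem]
      apply List.map_congr_left
      intro k hk
      have hku : k ≠ u := ((PySem.Set.mem_discard _ _ _).mp hk).2
      have : kalan.count k = (u :: t).count k := by
        rw [hkalan]
        exact List.count_filter (by simpa using hku)
      rw [this]

-- ===== VERDICT =====
theorem o_uzunluktaki_kelime_say_spec : Claim_equal_o_uzunluktaki_kelime_say := by
  intro s _
  unfold Spec_o_uzunluktaki_kelime_say o_uzunluktaki_kelime_say o_uzunluktaki_kelime_say_alt
  dsimp only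
  have hstep : (fun (d : PySem.Dict Int Int) (kelime : String) =>
      let u : Int := PySem.Str.len kelime
      if d.contains u then d.modify u 0 (· + 1) else d.insert u 1)
      = fun d kelime => d.modify (PySem.Str.len kelime) 0 (· + 1) := by
    funext d kelime
    dsimp only
    by_cases h : d.contains (PySem.Str.len kelime)
    · rw [if_pos h]
    · rw [if_neg h]
      have hb : d.contains (PySem.Str.len kelime) = false := by simpa using h
      have h0 := PySem.Dict.getD_of_not_contains d (0 : Int) hb
      simp only [PySem.Dict.insert, PySem.Dict.modify, hb, h0]
      norm_num
  have hm : ((PySem.Str.split₀ s).map (fun kelime => PySem.Str.len kelime)).foldl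
      (fun (d : PySem.Dict Int Int) x => d.modify x 0 (· + 1)) PySem.Dict.empty
      = (PySem.Str.split₀ s).foldl
      (fun d kelime => d.modify (PySem.Str.len kelime) 0 (· + 1)) PySem.Dict.empty :=
    List.foldl_map
  set L := (PySem.Str.split₀ s).map (fun kelime => PySem.Str.len kelime) with hL
  rw [hstep, ← hm, ← PySem.Dict.counter_eq_foldl, PySem.Dict.items_counter, grupla_eq]
  set ps := (PySem.Set.ofList L).map (fun k => (k, (L.count k : Int))) with hps
  have hfresh : ∀ a ∈ ps, (PySem.Dict.empty : PySem.Dict Int Int).contains a.1 = false := by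
    intro a _; exact PySem.Dict.contains_empty _
  have hnodup : (ps.map Prod.fst).Nodup := by
    rw [hps, List.map_map,
      show (Prod.fst ∘ fun k : Int => (k, (L.count k : Int))) = id from rfl, List.map_id]
    exact PySem.Set.nodup_ofList L
  have hitems : (List.foldl (fun acc p => acc.insert p.1 p.2) PySem.Dict.empty ps).items
      = PySem.Dict.empty.items ++ ps.map (fun a => (a.1, a.2)) :=
    PySem.Dict.items_foldl_insert_fresh ps Prod.fst Prod.snd PySem.Dict.empty hfresh hnodup
  rw [PySem.Dict.ofList, PySem.Dict.update, hitems]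
  simp
  rfl
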